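-- pv_equiv track=rewrite | github.com/ArtieLiu/sicp | chapter2/2.3.3/merge-set.py | adjoin_set
-- ===== SOURCE A (Python) =====
-- def isEmpty(s1):
--     return len(s1) == 0
--
-- def adjoin_set(e, set) -> list:
--     if isEmpty(set):
--         return [e]
--     elif e < set[0]:
--         return [e] + set
--     elif e == set[0]:
--         return set
--     else:
--         return [set[0]] + adjoin_set(e, set[1:])
-- ===== SOURCE B (Python) =====
-- def adjoin_set(e, set) -> list:
--     # single pass: find the first position whose element is >= e, build once
--     i = next((j for j, x in enumerate(set) if x >= e), len(set))
--     if i < len(set) and set[i] == e: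
--         return set
--     return set[:i] + [e] + set[i:]
-- ===== Notes on version B (the rewrite author's own statement) =====
-- stated objective: faster
-- what changed: Replaces the recursive rebuild ([head] + recurse on tail slice, quadratic copying) with a single scan for the first element >= e followed by one slice-based construction.
import Mathlib
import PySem

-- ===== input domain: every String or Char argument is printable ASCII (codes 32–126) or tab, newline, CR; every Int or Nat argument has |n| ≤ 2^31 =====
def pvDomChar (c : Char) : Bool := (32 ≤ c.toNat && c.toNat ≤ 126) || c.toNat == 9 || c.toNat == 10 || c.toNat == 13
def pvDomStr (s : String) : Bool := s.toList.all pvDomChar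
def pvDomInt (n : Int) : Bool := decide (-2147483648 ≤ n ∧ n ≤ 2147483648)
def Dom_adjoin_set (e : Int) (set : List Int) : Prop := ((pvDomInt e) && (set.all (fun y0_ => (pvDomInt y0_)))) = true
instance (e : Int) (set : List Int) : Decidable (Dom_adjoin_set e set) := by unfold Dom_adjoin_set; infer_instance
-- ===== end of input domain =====

-- B (faster): one scan for the first element >= e plus a single slice-based build, instead of A's recursive [head]+recurse-on-tail-slice rebuilding.
-- ===== PORT A =====
def adjoin_set (e : Int) (set : List Int) : List Int :=
  match set with
  | [] => [e]                                   -- isEmpty(set): return [e]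
  | x :: rest =>
    if e < x then e :: x :: rest                -- [e] + set
    else if e = x then x :: rest                -- return set
    else x :: adjoin_set e rest                 -- [set[0]] + adjoin_set(e, set[1:])

-- ===== PORT B =====
-- index of the first element >= e, or length if none (Source B's next(... enumerate ...))
def firstGE (e : Int) : List Int → Nat
  | [] => 0
  | x :: rest => if e ≤ x then 0 else firstGE e rest + 1

def adjoin_set_alt (e : Int) (set : List Int) : List Int :=
  let i := firstGE e set
  if i < set.length && set.getD i 0 == e then set   -- set[i] guarded by i < len, so getD is exact
  else set.take i ++ e :: set.drop i                -- set[:i] + [e] + set[i:] with 0 ≤ i ≤ len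

-- ===== PRECONDITION & SPEC =====
def Spec_adjoin_set (e : Int) (set : List Int) (out : List Int) : Prop := out = adjoin_set_alt e set
instance (e : Int) (set : List Int) (out : List Int) : Decidable (Spec_adjoin_set e set out) := by unfold Spec_adjoin_set; infer_instance

-- ===== CLAIM (what is proved, stated in full; the proofs are below) =====
def Claim_equal_adjoin_set : Prop := ∀ (e : Int) (set : List Int), Dom_adjoin_set e set → Spec_adjoin_set e set (adjoin_set e set)

-- ===== LEMMAS AND PROOFS =====

-- ===== VERDICT (by name: the statement is the Claim_ definition above) =====
theorem adjoin_set_eq_alt (e : Int) (set : List Int) : adjoin_set e set = adjoin_set_alt e set := by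
  induction set with
  | nil => simp [adjoin_set, adjoin_set_alt, firstGE]
  | cons x rest ih =>
    by_cases h1 : e < x
    · simp [adjoin_set, adjoin_set_alt, firstGE, h1, le_of_lt h1, (ne_of_lt h1).symm]
    · by_cases h2 : e = x
      · simp [adjoin_set, adjoin_set_alt, firstGE, h2]
      · have hx : ¬ e ≤ x := fun h => h2 (le_antisymm h (not_lt.mp h1))
        have hcons : adjoin_set_alt e (x :: rest) = x :: adjoin_set_alt e rest := by
          simp only [adjoin_set_alt, firstGE, if_neg hx, List.length_cons, List.getD_cons_succ,
            Nat.add_lt_add_iff_right, List.take_succ_cons, List.drop_succ_cons]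
          split <;> rfl
        rw [adjoin_set, if_neg h1, if_neg h2, ih, hcons]

theorem adjoin_set_spec : Claim_equal_adjoin_set := by
  intro e set _
  unfold Spec_adjoin_set
  exact adjoin_set_eq_alt e set
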